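-- pv_equiv track=rewrite | github.com/ConvLab/ConvLab-3 | convlab/policy/tus/multiwoz/usermanager.py | dic2list
-- ===== SOURCE A (Python) =====
-- def dic2list(da2goal):
--     action_list = []
--     for domain in da2goal:
--         for slot in da2goal[domain]:
--             if da2goal[domain][slot] is None:
--                 continue
--             act = f"{domain}-{da2goal[domain][slot]}"
--             if act not in action_list:
--                 action_list.append(act)
--     return action_list
-- ===== SOURCE B (Python) =====
-- def dic2list(da2goal):
--     acts = [f"{domain}-{value}"
--             for domain, slots in da2goal.items()
--             for value in slots.values()
--             if value is not None]
--
--     # first-occurrence dedup by head-and-filter: emit the head, then delete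
--     # every later copy of it from the remainder; no seen-set is maintained
--     out = []
--     while acts:
--         head = acts[0]
--         out.append(head)
--         acts = [x for x in acts[1:] if x != head]
--     return out
-- ===== Notes on version B (the rewrite author's own statement) =====
-- stated objective: alternative
-- what changed: A fuses flattening with a seen-list membership check before each append; B first flattens everything in one pass and then deduplicates by a head-and-filter loop (emit the head, filter out all its later copies from the remainder, repeat), maintaining no seen-set or membership accumulator at all.
import Mathlib
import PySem

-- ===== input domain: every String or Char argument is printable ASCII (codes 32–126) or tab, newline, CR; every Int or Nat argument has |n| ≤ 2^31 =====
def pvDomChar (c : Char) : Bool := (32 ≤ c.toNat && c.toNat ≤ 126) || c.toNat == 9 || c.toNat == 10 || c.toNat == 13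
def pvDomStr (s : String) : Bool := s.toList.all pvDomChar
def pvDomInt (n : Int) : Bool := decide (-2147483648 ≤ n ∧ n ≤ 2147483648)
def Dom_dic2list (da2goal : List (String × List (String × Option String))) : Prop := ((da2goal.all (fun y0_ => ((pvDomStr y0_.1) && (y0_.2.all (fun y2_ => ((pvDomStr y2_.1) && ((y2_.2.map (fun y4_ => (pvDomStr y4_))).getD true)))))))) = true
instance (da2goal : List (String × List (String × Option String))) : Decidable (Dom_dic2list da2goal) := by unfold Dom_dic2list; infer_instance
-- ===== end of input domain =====

-- B flattens everything in one pass, then deduplicates by a head-and-filter pass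
-- (emit the head, filter out its later copies, continue) instead of A's fused
-- membership-check-and-append loop; a different decomposition, same cost.

-- ===== PORT A =====
-- A: nested loop with an inline 'if act not in action_list: append' dedup.
def dic2list (da2goal : List (String × List (String × Option String))) : List String :=
  da2goal.foldl (fun action_list dom =>
    dom.2.foldl (fun action_list slot =>
      match slot.2 with
      | none => action_list
      | some v =>
        let act := dom.1 ++ "-" ++ v
        if action_list.contains act then action_list else action_list ++ [act])
      action_list) []

-- ===== PORT B =====
-- B's dedup loop: emit the head, drop every later copy of it, continue on the filtered rest.
def uniqHF : List String → List String
  | [] => []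
  | h :: t => h :: uniqHF (t.filter (fun x => x ≠ h))
termination_by xs => xs.length
decreasing_by
  simp only [List.length_unattach, List.length_cons]
  exact Nat.lt_succ_of_le (le_trans (List.length_filter_le _ _) (by simp))

-- B: one flat collect pass, then the head-and-filter dedup.
def dic2list_alt (da2goal : List (String × List (String × Option String))) : List String :=
  uniqHF (da2goal.flatMap (fun dom =>
    (dom.2.filterMap Prod.snd).map (fun v => dom.1 ++ "-" ++ v)))

-- ===== PRECONDITION & SPEC =====
def Spec_dic2list (da2goal : List (String × List (String × Option String))) (out : List String) : Prop := out = dic2list_alt da2goal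
instance (da2goal : List (String × List (String × Option String))) (out : List String) : Decidable (Spec_dic2list da2goal out) := by unfold Spec_dic2list; infer_instance

-- ===== CLAIM (what is proved, stated in full; the proofs are below) =====
def Claim_equal_dic2list : Prop := ∀ (da2goal : List (String × List (String × Option String))), Dom_dic2list da2goal → Spec_dic2list da2goal (dic2list da2goal)

-- ===== LEMMAS AND PROOFS =====

-- A's dedup step is exactly PySem.Set.add.
theorem dic2list_step_eq_add (acc : List String) (a : String) :
    (if acc.contains a then acc else acc ++ [a]) = PySem.Set.add acc a := rfl

-- A's inner loop over one domain's slots is a Set.update with that domain's action strings.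
theorem inner_eq_update (dom : String) (slots : List (String × Option String)) (acc : List String) :
    slots.foldl (fun action_list slot =>
      match slot.2 with
      | none => action_list
      | some v =>
        let act := dom ++ "-" ++ v
        if action_list.contains act then action_list else action_list ++ [act]) acc
    = PySem.Set.update acc ((slots.filterMap Prod.snd).map (fun v => dom ++ "-" ++ v)) := by
  induction slots generalizing acc with
  | nil => rfl
  | cons s rest ih =>
    cases h : s.2 with
    | none =>
      simp only [List.foldl_cons, h, List.filterMap_cons]
      exact ih acc
    | some v =>
      simp only [List.foldl_cons, h, List.filterMap_cons, List.map_cons,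
        PySem.Set.update_cons, dic2list_step_eq_add]
      exact ih _

-- A foldl of Set.update over per-domain lists is a single foldl of Set.add over the flat list.
theorem foldl_update_eq_foldl_add_flatMap {α : Type} (g : α → List String)
    (l : List α) (acc : List String) :
    l.foldl (fun s dom => PySem.Set.update s (g dom)) acc
    = (l.flatMap g).foldl PySem.Set.add acc := by
  induction l generalizing acc with
  | nil => rfl
  | cons d rest ih =>
    simp only [List.foldl_cons, List.flatMap_cons, List.foldl_append]
    rw [ih, PySem.Set.update]

-- A's whole computation is Set.ofList of the flat action list.
theorem dic2list_eq_ofList (da2goal : List (String × List (String × Option String))) :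
    dic2list da2goal = PySem.Set.ofList (da2goal.flatMap (fun dom =>
      (dom.2.filterMap Prod.snd).map (fun v => dom.1 ++ "-" ++ v))) := by
  unfold dic2list
  simp only [inner_eq_update]
  rw [foldl_update_eq_foldl_add_flatMap]
  exact (PySem.Set.update_nil_left _).symm

-- The seen-set accumulation equals the head-and-filter recursion: elements already in acc
-- behave like elements filtered away.
theorem foldl_add_eq_uniqHF (xs : List String) (acc : List String) :
    xs.foldl PySem.Set.add acc = acc ++ uniqHF (xs.filter (fun x => !acc.contains x)) := by
  induction xs generalizing acc with
  | nil => simp [uniqHF]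
  | cons h t ih =>
    by_cases hm : h ∈ acc
    · have hadd : PySem.Set.add acc h = acc := by simp [PySem.Set.add, hm]
      have hf : (h :: t).filter (fun x => !acc.contains x)
          = t.filter (fun x => !acc.contains x) := by
        simp [hm]
      rw [List.foldl_cons, hadd, hf]
      exact ih acc
    · have hadd : PySem.Set.add acc h = acc ++ [h] := by simp [PySem.Set.add, hm]
      have hf : (h :: t).filter (fun x => !acc.contains x)
          = h :: t.filter (fun x => !acc.contains x) := by
        simp [hm]
      rw [List.foldl_cons, hadd, hf, uniqHF, ih (acc ++ [h])]
      simp only [List.append_assoc, List.singleton_append]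
      congr 2
      rw [List.filter_filter]
      congr 1
      apply List.filter_congr
      intro x _
      simp only [List.contains_append, List.contains_cons]
      by_cases hxh : x = h
      · simp [hxh]
      · by_cases hxa : x ∈ acc <;> simp [hxh, hxa]

theorem uniqHF_eq_ofList (xs : List String) :
    uniqHF xs = PySem.Set.ofList xs := by
  have := foldl_add_eq_uniqHF xs []
  simpa [PySem.Set.ofList_eq_foldl] using this.symm

-- ===== VERDICT (by name: the statement is the Claim_ definition above) =====
theorem dic2list_spec : Claim_equal_dic2list := by
  intro da2goal _
  unfold Spec_dic2list dic2list_alt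
  rw [dic2list_eq_ofList, uniqHF_eq_ofList]
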